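-- pv_equiv track=rewrite | github.com/LiamShoLee/Tetris | draft.py | create_grid
-- ===== SOURCE A (Python) =====
-- def create_grid(lockedPositions={}):                             # creates a list of colours (change parameters when editing in menus)
--       grid = [[(0,0,0) for x in range(10)] for x in range(20)]    # create list for every row in grid (each row has 10 blocks with colours in it)
--
--       #checks for blocks that have already been dropped and locked
--       for i in range(len(grid)):                                  # for rows
--             for j in range(len(grid[i])):                         # for columns
--                   if (j,i) in lockedPositions:                   # if key exists
--                         c = lockedPositions[(j,i)]               # changes key to
--                         grid[i][j] = c                            # changes grid to c
--       return grid
-- ===== SOURCE B (Python) =====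
-- def create_grid(lockedPositions={}):
--     grid = [[(0, 0, 0)] * 10 for _ in range(20)]
--     for (x, y), c in lockedPositions.items():
--         if 0 <= x < 10 and 0 <= y < 20:
--             grid[y][x] = c
--     return grid
-- ===== Notes on version B (the rewrite author's own statement) =====
-- stated objective: simpler
-- what changed: Instead of scanning all 200 grid cells and testing each (j,i) for dict membership, B makes a single pass over lockedPositions.items() and writes each colour at its cell, with a bounds check so out-of-range keys are ignored exactly as A's scan ignores them.
import Mathlib
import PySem

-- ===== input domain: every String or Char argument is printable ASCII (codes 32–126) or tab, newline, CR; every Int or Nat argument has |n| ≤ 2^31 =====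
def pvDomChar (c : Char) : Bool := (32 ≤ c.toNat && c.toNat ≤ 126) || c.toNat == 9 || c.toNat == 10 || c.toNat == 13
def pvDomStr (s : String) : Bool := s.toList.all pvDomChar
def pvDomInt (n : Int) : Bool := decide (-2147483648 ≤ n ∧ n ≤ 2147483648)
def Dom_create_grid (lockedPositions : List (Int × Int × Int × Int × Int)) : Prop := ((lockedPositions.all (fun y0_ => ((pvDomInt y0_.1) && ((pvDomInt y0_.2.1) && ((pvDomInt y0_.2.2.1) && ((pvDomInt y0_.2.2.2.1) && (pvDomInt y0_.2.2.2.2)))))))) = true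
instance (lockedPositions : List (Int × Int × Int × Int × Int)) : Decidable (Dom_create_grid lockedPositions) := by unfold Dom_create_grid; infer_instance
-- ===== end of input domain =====

-- B replaces A's 200-cell scan with per-cell membership tests by one bounds-checked pass
-- over the locked entries themselves; same return value on every input (objective: simpler).

-- ===== PORT A =====
-- shared input-boundary conversion: the Python parameter is a dict keyed by (x, y);
-- the flat 5-tuples are rebuilt into that dict exactly as Python would (a later duplicate key wins).
def pvDictOf (lockedPositions : List (Int × Int × Int × Int × Int)) :
    PySem.Dict (Int × Int) (Int × Int × Int) :=
  lockedPositions.foldl (fun d t => d.insert (t.1, t.2.1) t.2.2) PySem.Dict.empty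

def create_grid (lockedPositions : List (Int × Int × Int × Int × Int)) : List (List (Int × Int × Int)) :=
  let d := pvDictOf lockedPositions
  let grid := (PySem.List.pyRange 0 20 1).map (fun _ => (PySem.List.pyRange 0 10 1).map (fun _ => ((0:Int), (0:Int), (0:Int))))
  (PySem.List.pyRange 0 ((grid.length : Nat) : Int) 1).foldl (fun g i =>
    (PySem.List.pyRange 0 (((PySem.List.pyGetD g i []).length : Nat) : Int) 1).foldl (fun g' j =>
      match d.get? (j, i) with
      | some c => PySem.List.pySetD g' i (PySem.List.pySetD (PySem.List.pyGetD g' i []) j c)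
      | none => g') g) grid

-- ===== PORT B =====
def create_grid_alt (lockedPositions : List (Int × Int × Int × Int × Int)) : List (List (Int × Int × Int)) :=
  let d := pvDictOf lockedPositions
  let grid := (PySem.List.pyRange 0 20 1).map (fun _ => List.replicate 10 ((0:Int), (0:Int), (0:Int)))
  d.items.foldl (fun g p =>
    if 0 ≤ p.1.1 ∧ p.1.1 < 10 ∧ 0 ≤ p.1.2 ∧ p.1.2 < 20 then
      PySem.List.pySetD g p.1.2 (PySem.List.pySetD (PySem.List.pyGetD g p.1.2 []) p.1.1 p.2)
    else g) grid

-- ===== PRECONDITION & SPEC =====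
def Spec_create_grid (lockedPositions : List (Int × Int × Int × Int × Int)) (out : List (List (Int × Int × Int))) : Prop := out = create_grid_alt lockedPositions
instance (lockedPositions : List (Int × Int × Int × Int × Int)) (out : List (List (Int × Int × Int))) : Decidable (Spec_create_grid lockedPositions out) := by unfold Spec_create_grid; infer_instance

-- ===== CLAIM (what is proved, stated in full; the proofs are below) =====
def Claim_equal_create_grid : Prop := ∀ (lockedPositions : List (Int × Int × Int × Int × Int)), Dom_create_grid lockedPositions → Spec_create_grid lockedPositions (create_grid lockedPositions)

-- ===== LEMMAS AND PROOFS =====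


def pvRowStep (d : PySem.Dict (Int × Int) (Int × Int × Int)) (i : Int) :
    List (Int × Int × Int) → Int → List (Int × Int × Int) :=
  fun r j => match d.get? (j, i) with
    | some c => PySem.List.pySetD r j c
    | none => r
theorem pvRowFold_length (d : PySem.Dict (Int × Int) (Int × Int × Int)) (i : Int)
    (js : List Int) (row : List (Int × Int × Int)) :
    (js.foldl (pvRowStep d i) row).length = row.length := by
  induction js generalizing row with
  | nil => rfl
  | cons j js ih =>
    simp only [List.foldl_cons]
    rw [ih]
    unfold pvRowStep
    cases d.get? (j, i) <;> simp [PySem.List.length_pySetD]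
theorem pvSetGet {α : Type} (l : List α) (i j : Nat) (a : α) :
    (l.set i a)[j]? = if i = j ∧ i < l.length then some a else l[j]? := by
  rcases Nat.lt_or_ge j l.length with h | h
  · simp [List.getElem?_set]; split_ifs <;> simp_all
  · rw [List.getElem?_eq_none (by simpa using h), List.getElem?_eq_none (by simpa using h)]
    split_ifs with hc <;> [omega; rfl]
theorem pvRowFold_get (d : PySem.Dict (Int × Int) (Int × Int × Int)) (i : Int)
    (js : List Int) (row : List (Int × Int × Int)) (k : Nat)
    (hjs : ∀ j ∈ js, 0 ≤ j ∧ j.toNat < row.length) :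
    (js.foldl (pvRowStep d i) row)[k]? =
      if (k : Int) ∈ js ∧ (d.get? ((k : Int), i)).isSome then d.get? ((k : Int), i) else row[k]? := by
  induction js generalizing row with
  | nil => simp
  | cons j js ih =>
    obtain ⟨hj0, hjlt⟩ := hjs j (by simp)
    have hstep_len : (pvRowStep d i row j).length = row.length := by
      unfold pvRowStep; cases d.get? (j, i) <;> simp [PySem.List.length_pySetD]
    simp only [List.foldl_cons]
    rw [ih _ (fun x hx => by rw [hstep_len]; exact hjs x (by simp [hx]))]
    by_cases hmem : (k : Int) ∈ js ∧ (d.get? ((k : Int), i)).isSome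
    · rw [if_pos hmem, if_pos ⟨List.mem_cons_of_mem _ hmem.1, hmem.2⟩]
    · rw [if_neg hmem]
      by_cases hkj : (k : Int) = j
      · subst hkj
        -- note j = ↑k so j.toNat = k
        rcases hsome : d.get? ((k : Int), i) with _ | c
        · unfold pvRowStep; simp only [hsome]
          rw [if_neg (by simp)]
        · unfold pvRowStep; simp only [hsome]
          rw [PySem.List.pySetD_of_nonneg row c hj0]
          rw [pvSetGet]
          simp only [Int.toNat_natCast] at hjlt ⊢
          simp [hjlt]
      · have : (pvRowStep d i row j)[k]? = row[k]? := by
          unfold pvRowStep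
          rcases d.get? (j, i) with _ | c
          · rfl
          · simp only []
            rw [PySem.List.pySetD_of_nonneg row c hj0, pvSetGet]
            rw [if_neg (by intro ⟨h1, _⟩; exact hkj (by omega))]
        rw [this]
        rw [if_neg (by rintro ⟨h1, h2⟩; rcases List.mem_cons.mp h1 with h | h; exact hkj h; exact hmem ⟨h, h2⟩)]

-- s2: need pvRowFold/pvAStep defs

def pvRowFold (d : PySem.Dict (Int × Int) (Int × Int × Int)) (i : Int)
    (row : List (Int × Int × Int)) : List (Int × Int × Int) :=
  (PySem.List.pyRange 0 ((row.length : Nat) : Int) 1).foldl (pvRowStep d i) row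
def pvAStep (d : PySem.Dict (Int × Int) (Int × Int × Int)) :
    List (List (Int × Int × Int)) → Int → List (List (Int × Int × Int)) :=
  fun g i =>
    (PySem.List.pyRange 0 (((PySem.List.pyGetD g i []).length : Nat) : Int) 1).foldl (fun g' j =>
      match d.get? (j, i) with
      | some c => PySem.List.pySetD g' i (PySem.List.pySetD (PySem.List.pyGetD g' i []) j c)
      | none => g') g
theorem pvRowStep_none (d : PySem.Dict (Int × Int) (Int × Int × Int)) (i j : Int)
    (r : List (Int × Int × Int)) (hd : d.get? (j, i) = none) : pvRowStep d i r j = r := by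
  unfold pvRowStep; simp [hd]

theorem pvRowStep_some (d : PySem.Dict (Int × Int) (Int × Int × Int)) (i j : Int)
    (r : List (Int × Int × Int)) (c : Int × Int × Int) (hd : d.get? (j, i) = some c) :
    pvRowStep d i r j = PySem.List.pySetD r j c := by
  unfold pvRowStep; simp [hd]

theorem pvGridRow (d : PySem.Dict (Int × Int) (Int × Int × Int)) (i : Int)
    (js : List Int) (g : List (List (Int × Int × Int))) (hi : 0 ≤ i) (hlen : i.toNat < g.length) :
    (js.foldl (fun g' j =>
      match d.get? (j, i) with
      | some c => PySem.List.pySetD g' i (PySem.List.pySetD (PySem.List.pyGetD g' i []) j c)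
      | none => g') g)
    = PySem.List.pySetD g i (js.foldl (pvRowStep d i) (PySem.List.pyGetD g i [])) := by
  induction js generalizing g with
  | nil =>
    simp only [List.foldl_nil]
    rw [PySem.List.pySetD_of_nonneg _ _ hi,
        PySem.List.pyGetD_eq_getElem g [] hi (by omega), List.set_getElem_self]
  | cons j js ih =>
    rw [List.foldl_cons, List.foldl_cons]
    cases hd : d.get? (j, i) with
    | none =>
      rw [pvRowStep_none d i j _ hd]
      exact ih g hlen
    | some c =>
      rw [pvRowStep_some d i j _ c hd]
      simp only [hd]
      have hg1len : (PySem.List.pySetD g i (PySem.List.pySetD (PySem.List.pyGetD g i []) j c)).length = g.length := by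
        rw [PySem.List.pySetD_of_nonneg _ _ hi]; simp
      rw [ih _ (by omega)]
      have h1 : PySem.List.pyGetD (PySem.List.pySetD g i (PySem.List.pySetD (PySem.List.pyGetD g i []) j c)) i []
          = PySem.List.pySetD (PySem.List.pyGetD g i []) j c := by
        rw [PySem.List.pySetD_of_nonneg _ _ hi,
            PySem.List.pyGetD_eq_getElem _ [] hi (by simp; omega), List.getElem_set_self]
      have h2 : ∀ X : List (Int × Int × Int),
          PySem.List.pySetD (PySem.List.pySetD g i (PySem.List.pySetD (PySem.List.pyGetD g i []) j c)) i X
          = PySem.List.pySetD g i X := by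
        intro X
        rw [PySem.List.pySetD_of_nonneg _ _ hi, PySem.List.pySetD_of_nonneg _ _ hi,
            PySem.List.pySetD_of_nonneg _ _ hi, List.set_set]
      rw [h1, h2]

theorem pvAStep_eq (d : PySem.Dict (Int × Int) (Int × Int × Int)) (i : Int)
    (g : List (List (Int × Int × Int))) (hi : 0 ≤ i) (hlen : i.toNat < g.length) :
    pvAStep d g i = PySem.List.pySetD g i (pvRowFold d i (PySem.List.pyGetD g i [])) := by
  unfold pvAStep pvRowFold
  exact pvGridRow d i _ g hi hlen

theorem pvAFold_get (d : PySem.Dict (Int × Int) (Int × Int × Int))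
    (is : List Int) (g : List (List (Int × Int × Int)))
    (his : ∀ i ∈ is, 0 ≤ i ∧ i.toNat < g.length) (hnd : is.Nodup) (k : Nat) :
    (is.foldl (pvAStep d) g)[k]? =
      if (k : Int) ∈ is then (g[k]?).map (pvRowFold d (k : Int)) else g[k]? := by
  induction is generalizing g with
  | nil => simp
  | cons i is ih =>
    obtain ⟨hi0, hilt⟩ := his i (by simp)
    obtain ⟨hnd1, hnd2⟩ := List.nodup_cons.mp hnd
    rw [List.foldl_cons, pvAStep_eq d i g hi0 hilt]
    have hg1len : (PySem.List.pySetD g i (pvRowFold d i (PySem.List.pyGetD g i []))).length = g.length := by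
      rw [PySem.List.pySetD_of_nonneg _ _ hi0]; simp
    rw [ih _ (fun x hx => by rw [hg1len]; exact his x (by simp [hx])) hnd2]
    rw [PySem.List.pySetD_of_nonneg _ _ hi0]
    by_cases hmem : (k : Int) ∈ is
    · have hki : (k : Int) ≠ i := fun h => hnd1 (h ▸ hmem)
      rw [if_pos hmem, if_pos (List.mem_cons_of_mem _ hmem)]
      rw [pvSetGet]
      rw [if_neg (by rintro ⟨h1, -⟩; exact hki (by omega))]
    · rw [if_neg hmem]
      by_cases hki : (k : Int) = i
      · subst hki
        have hcond : ((k : Int)).toNat = k ∧ ((k : Int)).toNat < g.length := ⟨by omega, by omega⟩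
        rw [pvSetGet, if_pos hcond, if_pos List.mem_cons_self]
        rw [PySem.List.pyGetD_eq_getElem g [] hi0 (by omega)]
        have hklt : k < g.length := by omega
        simp [List.getElem?_eq_getElem hklt]
      · rw [pvSetGet, if_neg (by rintro ⟨h1, -⟩; exact hki (by omega))]
        rw [if_neg (by rintro h; rcases List.mem_cons.mp h with h | h; exact hki h; exact hmem h)]

def pvBStep : List (List (Int × Int × Int)) → ((Int × Int) × (Int × Int × Int)) → List (List (Int × Int × Int)) :=
  fun g p =>
    if 0 ≤ p.1.1 ∧ p.1.1 < 10 ∧ 0 ≤ p.1.2 ∧ p.1.2 < 20 then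
      PySem.List.pySetD g p.1.2 (PySem.List.pySetD (PySem.List.pyGetD g p.1.2 []) p.1.1 p.2)
    else g
theorem pvBStep_shape (g : List (List (Int × Int × Int))) (p : (Int × Int) × (Int × Int × Int))
    (hg : g.length = 20) (hr : ∀ r ∈ g, r.length = 10) :
    (pvBStep g p).length = 20 ∧ ∀ r ∈ pvBStep g p, r.length = 10 := by
  unfold pvBStep
  split_ifs with hc
  · obtain ⟨hx0, hx1, hy0, hy1⟩ := hc
    rw [PySem.List.pySetD_of_nonneg _ _ hy0]
    refine ⟨by simp [hg], ?_⟩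
    intro r hmem
    rcases List.mem_or_eq_of_mem_set hmem with h | h
    · exact hr r h
    · subst h
      rw [PySem.List.pySetD_of_nonneg _ _ hx0, List.length_set]
      exact hr _ (by
        rw [PySem.List.pyGetD_eq_getElem g [] hy0 (by omega)]
        exact List.getElem_mem _)
  · exact ⟨hg, hr⟩

theorem pvBFold_shape (l : List ((Int × Int) × (Int × Int × Int)))
    (g : List (List (Int × Int × Int))) (hg : g.length = 20) (hr : ∀ r ∈ g, r.length = 10) :
    (l.foldl pvBStep g).length = 20 ∧ (∀ r ∈ l.foldl pvBStep g, r.length = 10) := by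
  induction l generalizing g with
  | nil => exact ⟨hg, hr⟩
  | cons p l ih =>
    rw [List.foldl_cons]
    obtain ⟨h1, h2⟩ := pvBStep_shape g p hg hr
    exact ih _ h1 h2


theorem pvBFold_cell (l : List ((Int × Int) × (Int × Int × Int)))
    (g : List (List (Int × Int × Int))) (hg : g.length = 20) (hr : ∀ r ∈ g, r.length = 10)
    (hnd : (l.map Prod.fst).Nodup) (i j : Nat) (hi : i < 20) (hj : j < 10) :
    ((l.foldl pvBStep g)[i]?.bind (fun r => r[j]?)) =
      ((PySem.Dict.mk l).get? ((j : Int), (i : Int))).or (g[i]?.bind (fun r => r[j]?)) := by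
  induction l generalizing g with
  | nil => simp [PySem.Dict.get?]
  | cons p l ih =>
    rw [List.map_cons] at hnd
    obtain ⟨hnd1, hnd2⟩ := List.nodup_cons.mp hnd
    rw [List.foldl_cons, PySem.Dict.get?_mk_cons]
    obtain ⟨h1, h2⟩ := pvBStep_shape g p hg hr
    rw [ih _ h1 h2 hnd2]
    obtain ⟨⟨x, y⟩, c⟩ := p
    by_cases hkey : (x, y) = ((j : Int), (i : Int))
    · obtain ⟨hx, hy⟩ := Prod.mk.inj hkey
      subst hx; subst hy
      have hnone : (PySem.Dict.mk l).get? ((j : Int), (i : Int)) = none := by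
        rw [PySem.Dict.get?_eq_none_iff_not_mem_keys]
        simp only [PySem.Dict.keys_mk]
        intro hmem
        exact hnd1 (by simpa using hmem)
      rw [hnone, if_pos (by simp)]
      simp only [Option.none_or, Option.some_or]
      -- LHS: the write lands exactly on cell (i, j)
      unfold pvBStep
      rw [if_pos (by refine ⟨?_, ?_, ?_, ?_⟩ <;> simp <;> omega)]
      simp only
      rw [PySem.List.pySetD_of_nonneg _ _ (by positivity)]
      rw [pvSetGet, if_pos ⟨by omega, by omega⟩]
      simp only [Option.bind_some]
      rw [PySem.List.pySetD_of_nonneg _ _ (by positivity)]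
      have hrowlen : (PySem.List.pyGetD g ((i : Nat) : Int) []).length = 10 := by
        rw [PySem.List.pyGetD_eq_getElem g [] (by positivity) (by omega)]
        exact hr _ (List.getElem_mem _)
      rw [pvSetGet, if_pos ⟨by omega, by omega⟩]
    · rw [if_neg (by simpa using hkey)]
      have hsame : ((pvBStep g ((x, y), c))[i]?.bind (fun r => r[j]?)) = (g[i]?.bind (fun r => r[j]?)) := by
        unfold pvBStep
        split_ifs with hc
        · obtain ⟨hx0, hx1, hy0, hy1⟩ := hc
          simp only at hx0 hx1 hy0 hy1 ⊢
          rw [PySem.List.pySetD_of_nonneg _ _ hy0, pvSetGet]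
          by_cases hyi : y.toNat = i
          · have hxj : x.toNat ≠ j := by
              intro hxj
              exact hkey (Prod.ext_iff.mpr ⟨by omega, by omega⟩)
            subst hyi
            rw [if_pos ⟨rfl, by omega⟩]
            simp only [Option.bind_some]
            rw [PySem.List.pySetD_of_nonneg _ _ hx0, pvSetGet, if_neg (by rintro ⟨h, -⟩; exact hxj h)]
            rw [PySem.List.pyGetD_eq_getElem g [] hy0 (by omega)]
            have hrl : (g[y.toNat]'(by omega)).length = 10 := hr _ (List.getElem_mem _)
            rw [List.getElem?_eq_getElem (show y.toNat < g.length by omega), Option.bind_some]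
          · rw [if_neg (by rintro ⟨h, -⟩; exact hyi h)]
        · rfl
      rw [hsame]

theorem pvMain (d : PySem.Dict (Int × Int) (Int × Int × Int)) (hnd : d.keys.Nodup) :
    ((PySem.List.pyRange 0 20 1).foldl (pvAStep d)
        (List.replicate 20 (List.replicate 10 ((0:Int), (0:Int), (0:Int)))))
    = d.items.foldl pvBStep (List.replicate 20 (List.replicate 10 ((0:Int), (0:Int), (0:Int)))) := by
  have hrepr : ∀ r ∈ List.replicate 20 (List.replicate 10 ((0:Int), (0:Int), (0:Int))), r.length = 10 := by
    intro r hr; rw [List.eq_of_mem_replicate hr]; simp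
  obtain ⟨hBlen, hBrows⟩ := pvBFold_shape d.items _ (by simp) hrepr
  have hndl : (d.items.map Prod.fst).Nodup := by
    have := hnd; simpa [PySem.Dict.keys] using this
  have hmk : PySem.Dict.mk d.items = d := PySem.Dict.ext_iff.mpr rfl
  apply List.ext_getElem?
  intro n
  rw [pvAFold_get d _ _ (fun i him => by
        obtain ⟨h1, h2⟩ := (PySem.List.mem_pyRange_one).mp him
        exact ⟨h1, by simp; omega⟩) (PySem.List.nodup_pyRange_one 0 20) n]
  by_cases hn : n < 20
  · rw [if_pos (PySem.List.mem_pyRange_one.mpr ⟨by positivity, by exact_mod_cast hn⟩)]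
    rw [List.getElem?_eq_getElem (by simpa using hn), List.getElem?_eq_getElem (by omega)]
    simp only [Option.map_some]
    congr 1
    have hrow : (List.replicate 20 (List.replicate 10 ((0:Int), (0:Int), (0:Int))))[n]'(by simpa using hn)
        = List.replicate 10 ((0:Int), (0:Int), (0:Int)) := List.getElem_replicate _
    rw [hrow]
    -- row-level extensionality
    apply List.ext_getElem?
    intro m
    have hAlen : (pvRowFold d (n : Int) (List.replicate 10 ((0:Int), (0:Int), (0:Int)))).length = 10 := by
      unfold pvRowFold; rw [pvRowFold_length]; simp
    have hBrowmem : (d.items.foldl pvBStep (List.replicate 20 (List.replicate 10 ((0:Int), (0:Int), (0:Int)))))[n]'(by omega) ∈ _ := List.getElem_mem _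
    have hBrlen := hBrows _ hBrowmem
    by_cases hm : m < 10
    · have hcell := pvBFold_cell d.items _ (by simp) hrepr hndl n m hn hm
      rw [hmk] at hcell
      have hR : ((d.items.foldl pvBStep (List.replicate 20 (List.replicate 10 ((0:Int), (0:Int), (0:Int)))))[n]'(by omega))[m]?
          = (d.items.foldl pvBStep (List.replicate 20 (List.replicate 10 ((0:Int), (0:Int), (0:Int)))))[n]?.bind (fun r => r[m]?) := by
        conv_rhs => rw [List.getElem?_eq_getElem (show n < (d.items.foldl pvBStep (List.replicate 20 (List.replicate 10 ((0:Int), (0:Int), (0:Int))))).length by omega)]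
        rw [Option.bind_some]
      rw [hR, hcell]
      unfold pvRowFold
      simp only [List.length_replicate]
      rw [pvRowFold_get d (n : Int) _ _ m (fun x hx => by
        obtain ⟨h1, h2⟩ := PySem.List.mem_pyRange_one.mp hx
        exact ⟨h1, by simp; omega⟩)]
      have hrepcell : (List.replicate 20 (List.replicate 10 ((0:Int), (0:Int), (0:Int))))[n]?.bind (fun r => r[m]?)
          = some ((0:Int), (0:Int), (0:Int)) := by
        rw [List.getElem?_eq_getElem (by simpa using hn), Option.bind_some, List.getElem_replicate,
            List.getElem?_eq_getElem (by simpa using hm), List.getElem_replicate]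
      rw [hrepcell]
      cases hdm : d.get? ((m : Int), (n : Int)) with
      | none =>
        rw [if_neg (by simp), Option.none_or]
        rw [List.getElem?_eq_getElem (by simpa using hm), List.getElem_replicate]
      | some c =>
        rw [if_pos ⟨PySem.List.mem_pyRange_one.mpr ⟨by positivity, by exact_mod_cast hm⟩, by simp⟩, Option.some_or]
    · rw [List.getElem?_eq_none (by omega), List.getElem?_eq_none (by omega)]
  · rw [if_neg (by intro hmem; obtain ⟨-, h2⟩ := PySem.List.mem_pyRange_one.mp hmem; omega)]
    rw [List.getElem?_eq_none (by simpa using hn), List.getElem?_eq_none (by omega)]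

-- ===== VERDICT (by name: the statement is the Claim_ definition above) =====
theorem create_grid_spec : Claim_equal_create_grid := by
  intro lp _
  unfold Spec_create_grid create_grid create_grid_alt
  have hnd : (pvDictOf lp).keys.Nodup := by
    unfold pvDictOf
    exact PySem.Dict.nodup_keys_foldl_insert_key lp (fun t => (t.1, t.2.1)) (fun _ t => t.2.2)
      PySem.Dict.empty PySem.Dict.nodup_keys_empty
  have hrepA : (PySem.List.pyRange 0 20 1).map (fun _ => (PySem.List.pyRange 0 10 1).map (fun _ => ((0:Int), (0:Int), (0:Int))))
      = List.replicate 20 (List.replicate 10 ((0:Int), (0:Int), (0:Int))) := by decide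
  have hrepB : (PySem.List.pyRange 0 20 1).map (fun _ => List.replicate 10 ((0:Int), (0:Int), (0:Int)))
      = List.replicate 20 (List.replicate 10 ((0:Int), (0:Int), (0:Int))) := by decide
  simp only [hrepA, hrepB, List.length_replicate, Nat.cast_ofNat]
  exact pvMain (pvDictOf lp) hnd
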